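-- pv_equiv track=rewrite | github.com/ruijorgenobre/deepMirCut | other/ensemble_tests/Scripts/graph_deltas_histogram.py | get_vertical_lines_lengths
-- ===== SOURCE A (Python) =====
-- def get_vertical_lines_lengths(hist_xVals,hist_yVals,lb_xVals,lb_yVals,ub_xVals,ub_yVals):
--     vertical_line_lengths = {}
--     for i in range(0,len(lb_xVals)):
--         xVal = lb_xVals[i]
--         for c in lb_yVals:
--             if xVal not in vertical_line_lengths:
--                 vertical_line_lengths[xVal] = lb_yVals[c][i]
--             elif vertical_line_lengths[xVal] > lb_yVals[c][i]:
--                 vertical_line_lengths[xVal] = lb_yVals[c][i]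
--     for i in range(0,len(hist_xVals)):
--         xVal = hist_xVals[i]
--         for c in hist_yVals:
--             if xVal not in vertical_line_lengths:
--                 vertical_line_lengths[xVal] = hist_yVals[c][i]
--             elif vertical_line_lengths[xVal] > hist_yVals[c][i]:
--                 vertical_line_lengths[xVal] = hist_yVals[c][i]
--     for i in range(0,len(ub_xVals)):
--         xVal = ub_xVals[i]
--         for c in ub_yVals:
--             if xVal not in vertical_line_lengths:
--                 vertical_line_lengths[xVal] = ub_yVals[c][i]
--             elif vertical_line_lengths[xVal] > ub_yVals[c][i]:
--                 vertical_line_lengths[xVal] = ub_yVals[c][i]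
--     return vertical_line_lengths
-- ===== SOURCE B (Python) =====
-- def get_vertical_lines_lengths(hist_xVals, hist_yVals, lb_xVals, lb_yVals, ub_xVals, ub_yVals):
--     # Pass 1: pool every candidate y-value per x-value (groups in lb, hist, ub order).
--     candidates = {}
--     for xVals, yVals in ((lb_xVals, lb_yVals), (hist_xVals, hist_yVals), (ub_xVals, ub_yVals)):
--         for i, x in enumerate(xVals):
--             cands = [yVals[c][i] for c in yVals]
--             if cands:
--                 candidates[x] = candidates.get(x, []) + cands
--     # Pass 2: reduce each candidate pool to its minimum.
--     return {x: min(v) for x, v in candidates.items()}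
-- ===== Notes on version B (the rewrite author's own statement) =====
-- stated objective: alternative
-- what changed: Replaces A's fused running-min dict (updating the minimum in place at every single access) by two passes: first build a table pooling all candidate y-values per x-value across the three groups, then a separate reduce pass taking min of each pool.
import Mathlib
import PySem

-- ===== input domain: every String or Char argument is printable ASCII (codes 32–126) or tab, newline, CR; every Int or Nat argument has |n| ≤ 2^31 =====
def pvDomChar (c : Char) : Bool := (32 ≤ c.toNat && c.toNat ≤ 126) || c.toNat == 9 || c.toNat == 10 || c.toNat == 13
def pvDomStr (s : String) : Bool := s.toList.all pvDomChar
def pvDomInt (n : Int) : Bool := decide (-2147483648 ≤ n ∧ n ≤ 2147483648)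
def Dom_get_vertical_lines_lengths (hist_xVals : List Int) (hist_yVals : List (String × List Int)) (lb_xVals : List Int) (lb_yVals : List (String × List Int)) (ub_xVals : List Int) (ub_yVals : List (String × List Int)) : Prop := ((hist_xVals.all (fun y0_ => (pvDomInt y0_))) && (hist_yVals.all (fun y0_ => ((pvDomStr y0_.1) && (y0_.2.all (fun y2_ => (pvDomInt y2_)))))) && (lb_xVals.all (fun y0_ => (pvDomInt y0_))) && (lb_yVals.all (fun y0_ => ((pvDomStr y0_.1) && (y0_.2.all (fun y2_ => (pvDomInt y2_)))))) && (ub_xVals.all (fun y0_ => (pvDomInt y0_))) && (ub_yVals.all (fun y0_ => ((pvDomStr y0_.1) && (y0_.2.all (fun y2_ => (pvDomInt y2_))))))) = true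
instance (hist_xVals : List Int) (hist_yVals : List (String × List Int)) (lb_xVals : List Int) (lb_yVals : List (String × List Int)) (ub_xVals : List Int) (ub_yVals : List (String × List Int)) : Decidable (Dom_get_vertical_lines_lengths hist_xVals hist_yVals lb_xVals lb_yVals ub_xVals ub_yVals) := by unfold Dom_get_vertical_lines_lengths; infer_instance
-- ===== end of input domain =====

-- B replaces A's fused running-min dict update by two passes (pool all candidate y-values per x, then take each pool's minimum); same cost, different decomposition (equality of RETURN values; neither mutates its arguments).
-- ===== PORT A =====
-- one inner-loop body of A: y = yVals[c][i]; running-min update of the dict at key x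
def gvllStep (i : Int) (x : Int) (d : PySem.Dict Int Int) (p : String × List Int) : PySem.Dict Int Int :=
  let y := PySem.List.pyGetD p.2 i 0
  if d.contains x = false then d.insert x y
  else if d.getD x 0 > y then d.insert x y
  else d

-- one of A's three 'for i in range(0, len(xVals))' loops
def gvllGroup (xVals : List Int) (yVals : List (String × List Int)) (d : PySem.Dict Int Int) : PySem.Dict Int Int :=
  (PySem.List.pyRange 0 (xVals.length : Int) 1).foldl
    (fun d i => yVals.foldl (gvllStep i (PySem.List.pyGetD xVals i 0)) d) d

def get_vertical_lines_lengths (hist_xVals : List Int) (hist_yVals : List (String × List Int)) (lb_xVals : List Int) (lb_yVals : List (String × List Int)) (ub_xVals : List Int) (ub_yVals : List (String × List Int)) : List (Int × Int) :=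
  (gvllGroup ub_xVals ub_yVals
    (gvllGroup hist_xVals hist_yVals
      (gvllGroup lb_xVals lb_yVals PySem.Dict.empty))).items

-- ===== PORT B =====
-- Python min(v) on a nonempty list of ints
def pvMinList (v : List Int) : Int := (PySem.List.min? v (fun y => y)).getD 0

-- pass 1, one group: pool the candidate y-values of every x-value into the table
def gvllCollect (xVals : List Int) (yVals : List (String × List Int)) (t : PySem.Dict Int (List Int)) : PySem.Dict Int (List Int) :=
  (PySem.List.enumerate xVals 0).foldl
    (fun t p =>
      let cands := yVals.map (fun q => PySem.List.pyGetD q.2 p.1 0)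
      if cands.isEmpty then t else t.insert p.2 (t.getD p.2 [] ++ cands)) t

def get_vertical_lines_lengths_alt (hist_xVals : List Int) (hist_yVals : List (String × List Int)) (lb_xVals : List Int) (lb_yVals : List (String × List Int)) (ub_xVals : List Int) (ub_yVals : List (String × List Int)) : List (Int × Int) :=
  ((gvllCollect ub_xVals ub_yVals
      (gvllCollect hist_xVals hist_yVals
        (gvllCollect lb_xVals lb_yVals PySem.Dict.empty))).items).map
    (fun p => (p.1, pvMinList p.2))

-- ===== PRECONDITION & SPEC =====
-- Pre_ excludes exactly the inputs where Python A raises IndexError: some y-value list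
-- shorter than its group's x-value list (A reads yVals[c][i] for every i < len(xVals)).
def Pre_get_vertical_lines_lengths (hist_xVals : List Int) (hist_yVals : List (String × List Int)) (lb_xVals : List Int) (lb_yVals : List (String × List Int)) (ub_xVals : List Int) (ub_yVals : List (String × List Int)) : Prop :=
  (∀ p ∈ hist_yVals, hist_xVals.length ≤ p.2.length) ∧
  (∀ p ∈ lb_yVals, lb_xVals.length ≤ p.2.length) ∧
  (∀ p ∈ ub_yVals, ub_xVals.length ≤ p.2.length)
instance (hist_xVals : List Int) (hist_yVals : List (String × List Int)) (lb_xVals : List Int) (lb_yVals : List (String × List Int)) (ub_xVals : List Int) (ub_yVals : List (String × List Int)) : Decidable (Pre_get_vertical_lines_lengths hist_xVals hist_yVals lb_xVals lb_yVals ub_xVals ub_yVals) := by unfold Pre_get_vertical_lines_lengths; infer_instance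

def pvWitness_get_vertical_lines_lengths : List Int × (List (String × List Int)) × List Int × (List (String × List Int)) × List Int × (List (String × List Int)) :=
  ([1, 2], [("a", [5, 3]), ("b", [4, 9])], [2], [("a", [7])], [1], [])

def Spec_get_vertical_lines_lengths (hist_xVals : List Int) (hist_yVals : List (String × List Int)) (lb_xVals : List Int) (lb_yVals : List (String × List Int)) (ub_xVals : List Int) (ub_yVals : List (String × List Int)) (out : List (Int × Int)) : Prop := out = get_vertical_lines_lengths_alt hist_xVals hist_yVals lb_xVals lb_yVals ub_xVals ub_yVals
instance (hist_xVals : List Int) (hist_yVals : List (String × List Int)) (lb_xVals : List Int) (lb_yVals : List (String × List Int)) (ub_xVals : List Int) (ub_yVals : List (String × List Int)) (out : List (Int × Int)) : Decidable (Spec_get_vertical_lines_lengths hist_xVals hist_yVals lb_xVals lb_yVals ub_xVals ub_yVals out) := by unfold Spec_get_vertical_lines_lengths; infer_instance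

-- ===== CLAIM (what is proved, stated in full; the proofs are below) =====
def Claim_equal_get_vertical_lines_lengths : Prop := ∀ (hist_xVals : List Int) (hist_yVals : List (String × List Int)) (lb_xVals : List Int) (lb_yVals : List (String × List Int)) (ub_xVals : List Int) (ub_yVals : List (String × List Int)), Dom_get_vertical_lines_lengths hist_xVals hist_yVals lb_xVals lb_yVals ub_xVals ub_yVals → Pre_get_vertical_lines_lengths hist_xVals hist_yVals lb_xVals lb_yVals ub_xVals ub_yVals → Spec_get_vertical_lines_lengths hist_xVals hist_yVals lb_xVals lb_yVals ub_xVals ub_yVals (get_vertical_lines_lengths hist_xVals hist_yVals lb_xVals lb_yVals ub_xVals ub_yVals)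

-- ===== LEMMAS AND PROOFS =====

-- proof-side view of B's table: take the minimum of every pool
def gvllMins (t : PySem.Dict Int (List Int)) : PySem.Dict Int Int :=
  PySem.Dict.mk (t.items.map (fun p => (p.1, pvMinList p.2)))

-- invariant of B's table: unique keys and every pool nonempty
def gvllInv (t : PySem.Dict Int (List Int)) : Prop :=
  t.keys.Nodup ∧ ∀ p ∈ t.items, p.2 ≠ []

lemma gvllMins_keys (t : PySem.Dict Int (List Int)) : (gvllMins t).keys = t.keys := by
  simp [gvllMins, PySem.Dict.keys]

lemma gvllMins_contains (t : PySem.Dict Int (List Int)) (x : Int) :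
    (gvllMins t).contains x = t.contains x := by
  rw [PySem.Dict.contains_eq_decide_mem_keys, PySem.Dict.contains_eq_decide_mem_keys, gvllMins_keys]

lemma gvllMins_get? (t : PySem.Dict Int (List Int)) (x : Int) :
    (gvllMins t).get? x = (t.get? x).map pvMinList := by
  obtain ⟨items⟩ := t
  induction items with
  | nil => rfl
  | cons p rest ih =>
      obtain ⟨k, v⟩ := p
      by_cases h : k = x
      · simp [gvllMins, PySem.Dict.get?_mk_cons, h]
      · simp only [gvllMins, PySem.Dict.get?_mk_cons, List.map_cons]
        simp only [h, beq_iff_eq, if_false]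
        simpa [gvllMins] using ih

lemma gvllMins_insert (t : PySem.Dict Int (List Int)) (x : Int) (l : List Int) :
    gvllMins (t.insert x l) = (gvllMins t).insert x (pvMinList l) := by
  apply PySem.Dict.ext
  have hc : (gvllMins t).contains x = t.contains x := gvllMins_contains t x
  by_cases h : t.contains x = true
  · rw [show (gvllMins (t.insert x l)).items = ((t.insert x l).items).map (fun p => (p.1, pvMinList p.2)) from rfl,
        PySem.Dict.items_insert_of_contains t l h,
        PySem.Dict.items_insert_of_contains (gvllMins t) (pvMinList l) (by rw [hc]; exact h)]
    rw [show (gvllMins t).items = t.items.map (fun p => (p.1, pvMinList p.2)) from rfl]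
    rw [List.map_map, List.map_map]
    apply List.map_congr_left
    intro p _
    by_cases hk : p.1 = x <;> simp [hk]
  · have h' : t.contains x = false := by simpa using h
    rw [show (gvllMins (t.insert x l)).items = ((t.insert x l).items).map (fun p => (p.1, pvMinList p.2)) from rfl,
        PySem.Dict.items_insert_of_not_contains t l h',
        PySem.Dict.items_insert_of_not_contains (gvllMins t) (pvMinList l) (by rw [hc]; exact h')]
    simp [gvllMins]

lemma pvMinList_append_singleton (l : List Int) (y : Int) (h : l ≠ []) :
    pvMinList (l ++ [y]) = if pvMinList l > y then y else pvMinList l := by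
  obtain ⟨a, r, rfl⟩ := List.exists_cons_of_ne_nil h
  rw [List.cons_append]
  simp only [pvMinList, PySem.List.min?_id_cons, Option.getD_some, List.foldl_append]
  simp only [List.foldl_cons, List.foldl_nil, min_def]
  split_ifs <;> omega

-- a dict rewritten at a key with the value it already holds is unchanged
lemma gvllDict_insert_self (d : PySem.Dict Int Int) (x v : Int)
    (hnd : d.keys.Nodup) (h : d.get? x = some v) : d.insert x v = d := by
  apply PySem.Dict.ext
  have hc : d.contains x = true := by
    rw [PySem.Dict.contains_eq_isSome_get?, h]; rfl
  rw [PySem.Dict.items_insert_of_contains d v hc]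
  conv_rhs => rw [← List.map_id d.items]
  apply List.map_congr_left
  intro p hp
  by_cases hk : p.1 = x
  · have hmem : (x, p.2) ∈ d.items := by
      have : p = (x, p.2) := by rw [← hk]
      rwa [this] at hp
    have := (PySem.Dict.get?_eq_some_iff_mem_items d x p.2 hnd).2 hmem
    rw [h] at this
    have hv : p.2 = v := by injection this.symm
    simp [hk, ← hv, Prod.ext_iff]
  · simp [hk]

-- A's single running-min update, commuted through gvllMins
lemma gvllStep_mins (t : PySem.Dict Int (List Int)) (x y : Int) (hinv : gvllInv t) :
    (if (gvllMins t).contains x = false then (gvllMins t).insert x y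
     else if (gvllMins t).getD x 0 > y then (gvllMins t).insert x y
     else (gvllMins t)) = gvllMins (t.insert x (t.getD x [] ++ [y])) := by
  rcases hinv with ⟨hnd, hne⟩
  by_cases h : t.contains x = true
  · obtain ⟨v, hv⟩ : ∃ v, t.get? x = some v := by
      have := PySem.Dict.contains_eq_isSome_get? t x
      rw [h] at this
      exact Option.isSome_iff_exists.1 this.symm
    have hmem : (x, v) ∈ t.items := (PySem.Dict.get?_eq_some_iff_mem_items t x v hnd).1 hv
    have hvne : v ≠ [] := hne _ hmem
    have hgd : t.getD x [] = v := by rw [PySem.Dict.getD_eq_get?_getD, hv]; rfl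
    have hgm : (gvllMins t).getD x 0 = pvMinList v := by
      rw [PySem.Dict.getD_eq_get?_getD, gvllMins_get?, hv]; rfl
    rw [gvllMins_contains, h, hgd, hgm, gvllMins_insert, pvMinList_append_singleton v y hvne]
    rw [if_neg (by simp : ¬ (true = false))]
    by_cases hgt : pvMinList v > y
    · rw [if_pos hgt, if_pos hgt]
    · rw [if_neg hgt, if_neg hgt]
      symm
      apply gvllDict_insert_self
      · rw [gvllMins_keys]; exact hnd
      · rw [gvllMins_get?, hv]; rfl
  · have h' : t.contains x = false := by simpa using h
    rw [gvllMins_contains, h', PySem.Dict.getD_of_not_contains t [] h']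
    rw [if_pos rfl, gvllMins_insert]
    rfl

lemma gvllInv_insert (t : PySem.Dict Int (List Int)) (x : Int) (l : List Int)
    (hinv : gvllInv t) (hl : l ≠ []) : gvllInv (t.insert x l) := by
  constructor
  · exact PySem.Dict.nodup_keys_insert t x l hinv.1
  · intro p hp
    rcases (PySem.Dict.mem_items_insert t x l p).1 hp with h | h
    · simpa [h] using hl
    · exact hinv.2 p h.1

-- folding A's update over a nonempty candidate list = one pooled insert of B
lemma gvllFold_cands (cs : List Int) (x : Int) :
    ∀ t : PySem.Dict Int (List Int), cs ≠ [] → gvllInv t →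
      cs.foldl (fun d y =>
          if d.contains x = false then d.insert x y
          else if d.getD x 0 > y then d.insert x y
          else d) (gvllMins t)
        = gvllMins (t.insert x (t.getD x [] ++ cs)) := by
  induction cs with
  | nil => intro t h _; exact absurd rfl h
  | cons y cs ih =>
    intro t _ hinv
    simp only [List.foldl_cons]
    rw [gvllStep_mins t x y hinv]
    have hinv1 : gvllInv (t.insert x (t.getD x [] ++ [y])) :=
      gvllInv_insert _ _ _ hinv (by simp)
    cases cs with
    | nil => simp
    | cons z zs =>
      rw [ih _ (by simp) hinv1]
      rw [PySem.Dict.getD_insert_self, PySem.Dict.insert_insert_self, List.append_assoc]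
      rfl

-- one (i, x) step of the group loops, commuted
lemma gvllStepIX (yVals : List (String × List Int)) (i x : Int)
    (t : PySem.Dict Int (List Int)) (hinv : gvllInv t) :
    yVals.foldl (gvllStep i x) (gvllMins t)
      = gvllMins (if (yVals.map (fun q => PySem.List.pyGetD q.2 i 0)).isEmpty then t
                  else t.insert x (t.getD x [] ++ yVals.map (fun q => PySem.List.pyGetD q.2 i 0))) := by
  have hmap : yVals.foldl (gvllStep i x) (gvllMins t)
      = (yVals.map (fun q => PySem.List.pyGetD q.2 i 0)).foldl (fun d y =>
          if d.contains x = false then d.insert x y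
          else if d.getD x 0 > y then d.insert x y
          else d) (gvllMins t) := by
    rw [List.foldl_map]
    rfl
  by_cases hc : yVals.map (fun q => PySem.List.pyGetD q.2 i 0) = []
  · have hy : yVals = [] := by simpa using hc
    simp [hy]
  · rw [hmap, gvllFold_cands _ x t hc hinv]
    have hy : yVals ≠ [] := by simpa using hc
    simp [List.isEmpty_iff, hy]

lemma gvllInv_stepIX (yVals : List (String × List Int)) (i x : Int)
    (t : PySem.Dict Int (List Int)) (hinv : gvllInv t) :
    gvllInv (if (yVals.map (fun q => PySem.List.pyGetD q.2 i 0)).isEmpty then t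
             else t.insert x (t.getD x [] ++ yVals.map (fun q => PySem.List.pyGetD q.2 i 0))) := by
  split
  · exact hinv
  · next h =>
    apply gvllInv_insert _ _ _ hinv
    intro hc
    rcases List.append_eq_nil_iff.1 hc with ⟨-, h2⟩
    simp [h2] at h

-- a fold that commutes with gvllMins step by step commutes as a whole
lemma gvllFold_pair (F : PySem.Dict Int Int → Int → PySem.Dict Int Int)
    (G : PySem.Dict Int (List Int) → Int → PySem.Dict Int (List Int))
    (h : ∀ t i, gvllInv t → F (gvllMins t) i = gvllMins (G t i) ∧ gvllInv (G t i)) :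
    ∀ (l : List Int) (t : PySem.Dict Int (List Int)), gvllInv t →
      l.foldl F (gvllMins t) = gvllMins (l.foldl G t) ∧ gvllInv (l.foldl G t) := by
  intro l
  induction l with
  | nil => intro t hinv; exact ⟨rfl, hinv⟩
  | cons i l ih =>
    intro t hinv
    obtain ⟨h1, h2⟩ := h t i hinv
    simp only [List.foldl_cons, h1]
    exact ih _ h2

-- one whole group commutes
lemma gvllGroup_mins (xVals : List Int) (yVals : List (String × List Int)) :
    ∀ t : PySem.Dict Int (List Int), gvllInv t →
      gvllGroup xVals yVals (gvllMins t) = gvllMins (gvllCollect xVals yVals t)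
        ∧ gvllInv (gvllCollect xVals yVals t) := by
  intro t hinv
  unfold gvllGroup gvllCollect
  rw [PySem.List.enumerate_eq_map_pyRange xVals 0, List.foldl_map]
  rw [show PySem.List.len xVals = (xVals.length : Int) from by simp [pysem]]
  exact gvllFold_pair
    (fun d i => yVals.foldl (gvllStep i (PySem.List.pyGetD xVals i 0)) d)
    (fun t j =>
      if (yVals.map (fun q => PySem.List.pyGetD q.2 j 0)).isEmpty then t
      else t.insert (PySem.List.pyGetD xVals j 0)
        ((t.getD (PySem.List.pyGetD xVals j 0) []) ++ yVals.map (fun q => PySem.List.pyGetD q.2 j 0)))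
    (fun t i hi => ⟨gvllStepIX yVals i (PySem.List.pyGetD xVals i 0) t hi,
                    gvllInv_stepIX yVals i (PySem.List.pyGetD xVals i 0) t hi⟩)
    (PySem.List.pyRange 0 (xVals.length : Int) 1) t hinv

lemma gvllInv_empty : gvllInv PySem.Dict.empty := by
  constructor <;> simp [PySem.Dict.empty, PySem.Dict.keys]

-- ===== VERDICT (by name: the statement is the Claim_ definition above) =====
theorem get_vertical_lines_lengths_spec : Claim_equal_get_vertical_lines_lengths := by
  intro hx hy lx ly ux uy _ _
  unfold Spec_get_vertical_lines_lengths
  unfold get_vertical_lines_lengths get_vertical_lines_lengths_alt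
  have e0 : (PySem.Dict.empty : PySem.Dict Int Int) = gvllMins PySem.Dict.empty := rfl
  obtain ⟨e1, i1⟩ := gvllGroup_mins lx ly PySem.Dict.empty gvllInv_empty
  obtain ⟨e2, i2⟩ := gvllGroup_mins hx hy _ i1
  obtain ⟨e3, _⟩ := gvllGroup_mins ux uy _ i2
  rw [e0, e1, e2, e3]
  rfl
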